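-- pv_equiv track=rewrite | github.com/ExpHP/thcrap-patches | scripts/binhack_helper.py | __locate_flipped_dword
-- ===== SOURCE A (Python) =====
-- def __locate_flipped_dword(a, b):
--     if len(a) != len(b):
--         raise RuntimeError('output assembly length changed!')
--     if a == b:
--         return None  # symbol not used
--
--     for start in range(len(a)):
--         if a[start] != b[start]:
--             break
--
--     for stop in range(start + 1, len(a)):
--         if a[stop] == b[stop]:
--             break
--     else: stop = len(a)
--
--     if a[stop:] != b[stop:]:
--         raise RuntimeError(f'more than one slice of bytes changed! (symbol may have been reused?)')
--
--     return (start, stop)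
-- ===== SOURCE B (Python) =====
-- def __locate_flipped_dword(a, b):
--     if len(a) != len(b):
--         raise RuntimeError('output assembly length changed!')
--     if a == b:
--         return None  # symbol not used
--
--     diffs = [i for i in range(len(a)) if a[i] != b[i]]
--     start, stop = diffs[0], diffs[-1] + 1
--     if diffs != list(range(start, stop)):
--         raise RuntimeError(f'more than one slice of bytes changed! (symbol may have been reused?)')
--     return (start, stop)
-- ===== Notes on version B (the rewrite author's own statement) =====
-- stated objective: simpler
-- what changed: Replaces A's two break-based scans, for-else fallback and trailing-slice comparison with one comprehension collecting all differing indices plus a single contiguity check against range(start, stop).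
import Mathlib
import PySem

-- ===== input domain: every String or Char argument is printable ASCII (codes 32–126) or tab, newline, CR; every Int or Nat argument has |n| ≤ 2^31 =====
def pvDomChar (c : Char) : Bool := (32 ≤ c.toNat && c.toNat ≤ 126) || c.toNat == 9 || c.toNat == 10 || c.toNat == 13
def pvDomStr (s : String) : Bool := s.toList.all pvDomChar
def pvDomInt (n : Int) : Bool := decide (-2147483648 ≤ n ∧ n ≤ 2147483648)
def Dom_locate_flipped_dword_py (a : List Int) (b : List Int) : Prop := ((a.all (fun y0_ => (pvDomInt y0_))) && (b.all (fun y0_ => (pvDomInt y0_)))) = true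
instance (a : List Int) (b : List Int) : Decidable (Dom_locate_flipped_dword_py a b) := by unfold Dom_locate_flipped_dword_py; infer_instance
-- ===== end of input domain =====

-- B replaces A's two break-based scans + for-else + trailing-slice comparison by one pass that
-- collects all differing indices and checks their contiguity (objective: simpler).
-- Pre_ excludes exactly the inputs where A raises RuntimeError (length mismatch, or a
-- non-contiguous set of differing positions); B raises the identical errors there.

-- ===== PORT A =====
-- first loop of A: 'for start in range(len(a)): if a[start] != b[start]: break'
-- (under a ≠ b with equal lengths the break always fires, so the no-break case is unreachable)
def pvScanStart (a b : List Int) (i : Nat) : Nat :=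
  if i < a.length then
    if a.getD i 0 ≠ b.getD i 0 then i else pvScanStart a b (i+1)
  else a.length - 1
termination_by a.length - i
decreasing_by omega

-- second loop of A: 'for stop in range(start+1, len(a)): if a[stop] == b[stop]: break else: stop = len(a)'
def pvScanStop (a b : List Int) (j : Nat) : Nat :=
  if j < a.length then
    if a.getD j 0 = b.getD j 0 then j else pvScanStop a b (j+1)
  else a.length
termination_by a.length - j
decreasing_by omega

def locate_flipped_dword_py (a : List Int) (b : List Int) : Option (Int × Int) :=
  if a.length ≠ b.length then none  -- raise RuntimeError('output assembly length changed!'); outside Pre_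
  else if a = b then none  -- symbol not used
  else
    let start := pvScanStart a b 0
    let stop := pvScanStop a b (start + 1)
    -- a[stop:] with stop ≥ 0 is exactly List.drop stop
    if a.drop stop ≠ b.drop stop then none  -- raise RuntimeError('more than one slice …'); outside Pre_
    else some ((start : Int), (stop : Int))

-- ===== PORT B =====
def locate_flipped_dword_py_alt (a : List Int) (b : List Int) : Option (Int × Int) :=
  if a.length ≠ b.length then none  -- raise; outside Pre_
  else if a = b then none
  else
    let diffs := (List.range a.length).filter (fun i => a.getD i 0 ≠ b.getD i 0)
    let start := diffs.headD 0
    let stop := diffs.getLastD 0 + 1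
    if diffs ≠ List.range' start (stop - start) then none  -- raise; outside Pre_
    else some ((start : Int), (stop : Int))

-- ===== PRECONDITION & SPEC =====
-- Pre_ excludes exactly the inputs on which A raises: unequal lengths, or differing
-- positions that do not form one contiguous run (both Pythons raise RuntimeError there).
def Pre_locate_flipped_dword_py (a : List Int) (b : List Int) : Prop :=
  a.length = b.length ∧
  List.IsChain (fun x y => y = x + 1)
    ((List.range a.length).filter (fun i => a.getD i 0 ≠ b.getD i 0))
instance (a : List Int) (b : List Int) : Decidable (Pre_locate_flipped_dword_py a b) := by
  unfold Pre_locate_flipped_dword_py; infer_instance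

def pvWitness_locate_flipped_dword_py : List Int × List Int := ([0, 1, 2], [0, 7, 8])

def Spec_locate_flipped_dword_py (a : List Int) (b : List Int) (out : Option (Int × Int)) : Prop := out = locate_flipped_dword_py_alt a b
instance (a : List Int) (b : List Int) (out : Option (Int × Int)) : Decidable (Spec_locate_flipped_dword_py a b out) := by unfold Spec_locate_flipped_dword_py; infer_instance

-- ===== CLAIM (what is proved, stated in full; the proofs are below) =====
def Claim_equal_locate_flipped_dword_py : Prop := ∀ (a : List Int) (b : List Int), Dom_locate_flipped_dword_py a b → Pre_locate_flipped_dword_py a b → Spec_locate_flipped_dword_py a b (locate_flipped_dword_py a b)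

-- ===== LEMMAS AND PROOFS =====

-- a succ-chain is the range starting at its head
lemma chain'_succ_eq_range' : ∀ (l : List Nat), List.IsChain (fun x y => y = x + 1) l →
    l = List.range' (l.headD 0) l.length := by
  intro l
  induction l with
  | nil => intro _; rfl
  | cons x t ih =>
    intro h
    cases t with
    | nil => rfl
    | cons y t' =>
      rw [List.isChain_cons_cons] at h
      obtain ⟨hy, ht⟩ := h
      have h2 := ih ht
      simp only [List.headD_cons] at h2
      have h3 : t' = List.range' (y + 1) t'.length := by
        rw [List.length_cons, List.range'_succ] at h2
        exact (List.cons_eq_cons.mp h2).2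
      subst hy
      simp only [List.headD_cons, List.length_cons]
      rw [List.range'_succ, List.range'_succ, ← h3]

lemma getLastD_range' : ∀ (k d0 : Nat), (List.range' d0 (k+1)).getLastD 0 = d0 + k := by
  intro k
  induction k with
  | zero => intro d0; rfl
  | succ m ih =>
    intro d0
    rw [List.range'_succ, List.getLastD_cons]
    have h := ih (d0 + 1)
    rw [List.range'_succ] at h ⊢
    rw [List.getLastD_cons] at h ⊢
    omega

lemma scanStart_eq (a b : List Int) (d0 : Nat) (hd0 : d0 < a.length)
    (hdiff : a.getD d0 0 ≠ b.getD d0 0)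
    (hbefore : ∀ j, j < d0 → a.getD j 0 = b.getD j 0) :
    ∀ m i, d0 - i = m → i ≤ d0 → pvScanStart a b i = d0 := by
  intro m
  induction m with
  | zero =>
    intro i h0 hle
    have : i = d0 := by omega
    subst this
    unfold pvScanStart
    rw [if_pos hd0, if_pos hdiff]
  | succ m ih =>
    intro i h0 hle
    have hi : i < d0 := by omega
    unfold pvScanStart
    have hilen : i < a.length := by omega
    simp only [hilen, if_true, hbefore i hi, ne_eq, not_true_eq_false, if_false]
    exact ih (i+1) (by omega) (by omega)

-- ===== VERDICT (by name: the statement is the Claim_ definition above) =====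
theorem locate_flipped_dword_py_spec : Claim_equal_locate_flipped_dword_py := by
  intro a b _ hpre
  obtain ⟨hlen, hchain⟩ := hpre
  unfold Spec_locate_flipped_dword_py locate_flipped_dword_py locate_flipped_dword_py_alt
  rw [if_neg (not_not_intro hlen), if_neg (not_not_intro hlen)]
  by_cases hab : a = b
  · rw [if_pos hab, if_pos hab]
  · rw [if_neg hab, if_neg hab]
    set diffs := (List.range a.length).filter (fun i => a.getD i 0 ≠ b.getD i 0) with hdiffs
    have hmem : ∀ i, i ∈ diffs ↔ (i < a.length ∧ a.getD i 0 ≠ b.getD i 0) := by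
      intro i; simp [hdiffs, List.mem_filter, List.mem_range]
    -- diffs is nonempty
    have hne : diffs ≠ [] := by
      intro hnil
      apply hab
      apply List.ext_getElem (by omega)
      intro i hi _
      have : a.getD i 0 = b.getD i 0 := by
        by_contra h
        have : i ∈ diffs := (hmem i).2 ⟨hi, h⟩
        simp [hnil] at this
      simpa [List.getD_eq_getElem?_getD, List.getElem?_eq_getElem, hi,
             show i < b.length by omega] using this
    set d0 := diffs.headD 0 with hd0def
    set k := diffs.length with hkdef
    have hk : 1 ≤ k := by
      cases hd : diffs with
      | nil => exact absurd hd hne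
      | cons x t => simp [hkdef, hd]
    have hrange : diffs = List.range' d0 k := chain'_succ_eq_range' diffs hchain
    have hiff : ∀ i, (i < a.length ∧ a.getD i 0 ≠ b.getD i 0) ↔ (d0 ≤ i ∧ i < d0 + k) := by
      intro i
      rw [← hmem i, hrange, List.mem_range'_1]
    have hd0lt : d0 < a.length ∧ a.getD d0 0 ≠ b.getD d0 0 :=
      (hiff d0).2 ⟨le_refl _, by omega⟩
    have hsle : d0 + k ≤ a.length := by
      have := (hiff (d0 + k - 1)).2 ⟨by omega, by omega⟩
      omega
    have hbefore : ∀ j, j < d0 → a.getD j 0 = b.getD j 0 := by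
      intro j hj
      by_contra h
      have hjlen : j < a.length := by omega
      have := (hiff j).1 ⟨hjlen, h⟩
      omega
    have hstart : pvScanStart a b 0 = d0 :=
      scanStart_eq a b d0 hd0lt.1 hd0lt.2 hbefore d0 0 (by omega) (by omega)
    have hafter : ∀ i, d0 + k ≤ i → i < a.length → a.getD i 0 = b.getD i 0 := by
      intro i h1 h2
      by_contra h
      have := (hiff i).1 ⟨h2, h⟩
      omega
    have hmid : ∀ i, i < d0 + k → d0 + 1 ≤ i → a.getD i 0 ≠ b.getD i 0 := by
      intro i h1 h2
      exact ((hiff i).2 ⟨by omega, h1⟩).2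
    -- scanStop from d0+1 : treat interval [d0+1, d0+k)
    have hstop : pvScanStop a b (d0 + 1) = d0 + k := by
      -- use scanStop_eq with "diff below s relative to start"; need ∀ i < s diff only for i ≥ j.
      -- strengthen: all i in [d0+1, d0+k) differ; scanStop_eq's hdiff quantifies all i < s,
      -- so prove directly by a small induction instead: reuse scanStop_eq on shifted hyps.
      have hagree : d0 + k < a.length → a.getD (d0+k) 0 = b.getD (d0+k) 0 :=
        fun h => hafter (d0+k) (le_refl _) h
      -- scanStop never looks at indices below its argument, and we start at d0+1;
      -- adapt scanStop_eq: we prove the generalized statement here inline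
      have gen : ∀ m j, d0 + k - j = m → d0 + 1 ≤ j → j ≤ d0 + k → pvScanStop a b j = d0 + k := by
        intro m
        induction m with
        | zero =>
          intro j h0 _ hle
          have hj : j = d0 + k := by omega
          subst hj
          unfold pvScanStop
          by_cases h : d0 + k < a.length
          · rw [if_pos h, if_pos (hagree h)]
          · rw [if_neg h]; omega
        | succ m ih =>
          intro j h0 hge hle
          have hj : j < d0 + k := by omega
          unfold pvScanStop
          have hjlen : j < a.length := by omega
          simp only [hjlen, if_true, hmid j hj hge, if_false]
          exact ih (j+1) (by omega) (by omega) (by omega)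
      exact gen (d0 + k - (d0+1)) (d0+1) rfl (by omega) (by omega)
    simp only []
    rw [hstart, hstop]
    -- the trailing slices agree
    have hdrop : a.drop (d0 + k) = b.drop (d0 + k) := by
      apply List.ext_getElem (by simp [hlen])
      intro i hi1 hi2
      simp only [List.getElem_drop]
      have h1 : d0 + k + i < a.length := by simp at hi1; omega
      have h2 : d0 + k + i < b.length := by omega
      have := hafter (d0 + k + i) (by omega) h1
      simpa [List.getD_eq_getElem?_getD, List.getElem?_eq_getElem, h1, h2] using this
    rw [if_neg (not_not_intro hdrop)]
    -- B side
    have hlast : diffs.getLastD 0 = d0 + k - 1 := by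
      rw [hrange]
      obtain ⟨m, hm⟩ : ∃ m, k = m + 1 := ⟨k - 1, by omega⟩
      rw [hm, getLastD_range']
      omega
    rw [hlast]
    have hstopeq : d0 + k - 1 + 1 = d0 + k := by omega
    rw [hstopeq]
    have : d0 + k - d0 = k := by omega
    rw [this, ← hrange]
    rw [if_neg (not_not_intro rfl)]
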